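-- pv_equiv track=rewrite | github.com/LiquidGalaxyLAB/LG-RoboStream | Server/FastAPI/LG/image_generator.py | _organize_sensor_data
-- ===== SOURCE A (Python) =====
-- def _organize_sensor_data(data_list):
--     """Organizes sensor data into logical categories"""
--     categories = {
--         "Location & Navigation": [],
--         "Environmental": [],
--         "Motion & Orientation": [],
--         "System Status": [],
--         "Other": []
--     }
--
--     for item in data_list:
--         label = item.get('label', '').lower()
--
--         if any(keyword in label for keyword in ['gps', 'position', 'latitude', 'longitude', 'location', 'speed', 'velocity', 'altitude']):
--             categories["Location & Navigation"].append(item)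
--         elif any(keyword in label for keyword in ['temperature', 'humidity', 'pressure', 'light', 'sound']):
--             categories["Environmental"].append(item)
--         elif any(keyword in label for keyword in ['gyro', 'accel', 'magnet', 'rotation', 'orientation', 'imu', 'compass', 'magnetic']):
--             categories["Motion & Orientation"].append(item)
--         elif any(keyword in label for keyword in ['battery', 'cpu', 'memory', 'disk', 'network', 'status']):
--             categories["System Status"].append(item)
--         else:
--             categories["Other"].append(item)
--
--     # Remove empty categories
--     return {k: v for k, v in categories.items() if v}
-- ===== SOURCE B (Python) =====
-- CATEGORIES = [
--     ("Location & Navigation", ['gps', 'position', 'latitude', 'longitude', 'location', 'speed', 'velocity', 'altitude']),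
--     ("Environmental", ['temperature', 'humidity', 'pressure', 'light', 'sound']),
--     ("Motion & Orientation", ['gyro', 'accel', 'magnet', 'rotation', 'orientation', 'imu', 'compass', 'magnetic']),
--     ("System Status", ['battery', 'cpu', 'memory', 'disk', 'network', 'status']),
-- ]
--
--
-- def _classify(item):
--     """Name of the first category whose keyword occurs in the item's label."""
--     label = item.get('label', '').lower()
--     for name, keywords in CATEGORIES:
--         if any(keyword in label for keyword in keywords):
--             return name
--     return "Other"
--
--
-- def _organize_sensor_data(data_list):
--     """Organizes sensor data into logical categories"""
--     result = {}
--     for name in [n for n, _ in CATEGORIES] + ["Other"]: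
--         bucket = [item for item in data_list if _classify(item) == name]
--         if bucket:
--             result[name] = bucket
--     return result
-- ===== Notes on version B (the rewrite author's own statement) =====
-- stated objective: idiomatic
-- what changed: A makes one pass appending each item into a pre-built dict of five buckets and then drops empty ones; B instead factors out a first-match classify function over an ordered (category, keywords) table and builds the result with one filter pass of the data per category, keeping only non-empty buckets.
import Mathlib
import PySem

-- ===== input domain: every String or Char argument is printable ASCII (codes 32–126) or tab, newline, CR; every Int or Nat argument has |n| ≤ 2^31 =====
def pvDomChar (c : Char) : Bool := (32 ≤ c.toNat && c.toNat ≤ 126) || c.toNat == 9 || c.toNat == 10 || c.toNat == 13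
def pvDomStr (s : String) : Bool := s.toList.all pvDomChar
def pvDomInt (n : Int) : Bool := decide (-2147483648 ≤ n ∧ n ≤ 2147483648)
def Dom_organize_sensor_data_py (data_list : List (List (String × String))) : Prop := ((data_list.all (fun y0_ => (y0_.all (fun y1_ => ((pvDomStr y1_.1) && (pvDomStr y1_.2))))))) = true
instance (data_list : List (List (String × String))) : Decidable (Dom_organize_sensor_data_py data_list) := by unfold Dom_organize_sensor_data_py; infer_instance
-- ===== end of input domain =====

-- B replaces A's single append-into-dict pass by a classify function plus one filter pass
-- per category over a (name, keywords) table (objective: idiomatic; same asymptotic cost).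

-- ===== PORT A =====
def organize_sensor_data_py (data_list : List (List (String × String))) : List (String × List (List (String × String))) :=
  let categories : PySem.Dict String (List (List (String × String))) :=
    PySem.Dict.ofList [("Location & Navigation", []), ("Environmental", []),
      ("Motion & Orientation", []), ("System Status", []), ("Other", [])]
  let cats := data_list.foldl (fun cats item =>
    let label := PySem.Str.lower ((PySem.Dict.mk item).getD "label" "")
    if (["gps", "position", "latitude", "longitude", "location", "speed", "velocity", "altitude"].any
        (fun keyword => PySem.Str.isIn keyword label)) then
      cats.modify "Location & Navigation" [] (· ++ [item])
    else if (["temperature", "humidity", "pressure", "light", "sound"].any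
        (fun keyword => PySem.Str.isIn keyword label)) then
      cats.modify "Environmental" [] (· ++ [item])
    else if (["gyro", "accel", "magnet", "rotation", "orientation", "imu", "compass", "magnetic"].any
        (fun keyword => PySem.Str.isIn keyword label)) then
      cats.modify "Motion & Orientation" [] (· ++ [item])
    else if (["battery", "cpu", "memory", "disk", "network", "status"].any
        (fun keyword => PySem.Str.isIn keyword label)) then
      cats.modify "System Status" [] (· ++ [item])
    else
      cats.modify "Other" [] (· ++ [item])) categories
  cats.items.filter (fun kv => !kv.2.isEmpty)

-- ===== PORT B =====
def pvCategories : List (String × List String) :=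
  [("Location & Navigation", ["gps", "position", "latitude", "longitude", "location", "speed", "velocity", "altitude"]),
   ("Environmental", ["temperature", "humidity", "pressure", "light", "sound"]),
   ("Motion & Orientation", ["gyro", "accel", "magnet", "rotation", "orientation", "imu", "compass", "magnetic"]),
   ("System Status", ["battery", "cpu", "memory", "disk", "network", "status"])]

def pvScanTable : List (String × List String) → String → String
  | [], _ => "Other"
  | (name, keywords) :: rest, label =>
      if keywords.any (fun keyword => PySem.Str.isIn keyword label) then name
      else pvScanTable rest label

def pvClassify (item : List (String × String)) : String :=
  pvScanTable pvCategories (PySem.Str.lower ((PySem.Dict.mk item).getD "label" ""))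

def organize_sensor_data_py_alt (data_list : List (List (String × String))) : List (String × List (List (String × String))) :=
  (pvCategories.map (·.1) ++ ["Other"]).foldl (fun result name =>
    let bucket := data_list.filter (fun item => pvClassify item == name)
    if bucket.isEmpty then result else result ++ [(name, bucket)]) []

-- ===== PRECONDITION & SPEC =====
def Spec_organize_sensor_data_py (data_list : List (List (String × String))) (out : List (String × List (List (String × String)))) : Prop := out = organize_sensor_data_py_alt data_list
instance (data_list : List (List (String × String))) (out : List (String × List (List (String × String)))) : Decidable (Spec_organize_sensor_data_py data_list out) := by unfold Spec_organize_sensor_data_py; infer_instance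

-- ===== CLAIM (what is proved, stated in full; the proofs are below) =====
def Claim_equal_organize_sensor_data_py : Prop := ∀ (data_list : List (List (String × String))), Dom_organize_sensor_data_py data_list → Spec_organize_sensor_data_py data_list (organize_sensor_data_py data_list)

-- ===== LEMMAS AND PROOFS =====

-- A's loop body is "append the item to the bucket of its category".
theorem stepA_eq_modify_classify (cats : PySem.Dict String (List (List (String × String)))) (item : List (String × String)) :
    (let label := PySem.Str.lower ((PySem.Dict.mk item).getD "label" "")
     if (["gps", "position", "latitude", "longitude", "location", "speed", "velocity", "altitude"].any
         (fun keyword => PySem.Str.isIn keyword label)) then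
       cats.modify "Location & Navigation" [] (· ++ [item])
     else if (["temperature", "humidity", "pressure", "light", "sound"].any
         (fun keyword => PySem.Str.isIn keyword label)) then
       cats.modify "Environmental" [] (· ++ [item])
     else if (["gyro", "accel", "magnet", "rotation", "orientation", "imu", "compass", "magnetic"].any
         (fun keyword => PySem.Str.isIn keyword label)) then
       cats.modify "Motion & Orientation" [] (· ++ [item])
     else if (["battery", "cpu", "memory", "disk", "network", "status"].any
         (fun keyword => PySem.Str.isIn keyword label)) then
       cats.modify "System Status" [] (· ++ [item])
     else
       cats.modify "Other" [] (· ++ [item])) =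
    cats.modify (pvClassify item) [] (· ++ [item]) := by
  simp only [pvClassify, pvCategories, pvScanTable]
  split_ifs <;> rfl

theorem classify_mem (item : List (String × String)) :
    pvClassify item ∈ ["Location & Navigation", "Environmental", "Motion & Orientation", "System Status", "Other"] := by
  simp only [pvClassify, pvCategories, pvScanTable]
  split_ifs <;> simp

-- B's per-category loop, in closed form.
theorem altFold_eq_filter_map (dl : List (List (String × String)))
    (names : List String) (acc : List (String × List (List (String × String)))) :
    names.foldl (fun result name =>
      let bucket := dl.filter (fun item => pvClassify item == name)
      if bucket.isEmpty then result else result ++ [(name, bucket)]) acc =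
    acc ++ (names.map (fun k => (k, dl.filter (fun item => pvClassify item == k)))).filter
      (fun kv => !kv.2.isEmpty) := by
  induction names generalizing acc with
  | nil => simp
  | cons n rest ih =>
    rw [List.foldl_cons, ih, List.map_cons, List.filter_cons]
    by_cases h : (dl.filter (fun item => pvClassify item == n)).isEmpty
    · simp [h]
    · simp [h]

theorem organize_sensor_data_py_spec' (data_list : List (List (String × String))) :
    organize_sensor_data_py data_list = organize_sensor_data_py_alt data_list := by
  unfold organize_sensor_data_py organize_sensor_data_py_alt
  have hstep : (data_list.foldl (fun cats item =>
      let label := PySem.Str.lower ((PySem.Dict.mk item).getD "label" "")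
      if (["gps", "position", "latitude", "longitude", "location", "speed", "velocity", "altitude"].any
          (fun keyword => PySem.Str.isIn keyword label)) then
        cats.modify "Location & Navigation" [] (· ++ [item])
      else if (["temperature", "humidity", "pressure", "light", "sound"].any
          (fun keyword => PySem.Str.isIn keyword label)) then
        cats.modify "Environmental" [] (· ++ [item])
      else if (["gyro", "accel", "magnet", "rotation", "orientation", "imu", "compass", "magnetic"].any
          (fun keyword => PySem.Str.isIn keyword label)) then
        cats.modify "Motion & Orientation" [] (· ++ [item])
      else if (["battery", "cpu", "memory", "disk", "network", "status"].any
          (fun keyword => PySem.Str.isIn keyword label)) then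
        cats.modify "System Status" [] (· ++ [item])
      else
        cats.modify "Other" [] (· ++ [item]))
      (PySem.Dict.ofList [("Location & Navigation", []), ("Environmental", []),
        ("Motion & Orientation", []), ("System Status", []), ("Other", [])])) =
      data_list.foldl (fun cats item => cats.modify (pvClassify item) [] (· ++ [item]))
        (PySem.Dict.ofList [("Location & Navigation", []), ("Environmental", []),
          ("Motion & Orientation", []), ("System Status", []), ("Other", [])]) := by
    congr 1
    funext cats item
    exact stepA_eq_modify_classify cats item
  simp only [hstep]
  set d0 : PySem.Dict String (List (List (String × String))) :=
    PySem.Dict.ofList [("Location & Navigation", []), ("Environmental", []),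
      ("Motion & Orientation", []), ("System Status", []), ("Other", [])] with hd0
  set dF := data_list.foldl (fun cats item => cats.modify (pvClassify item) [] (· ++ [item])) d0
    with hdF
  have hmap : dF = (data_list.map (fun it => (pvClassify it, it))).foldl
      (fun d p => PySem.Dict.modify d p.1 [] (· ++ [p.2])) d0 :=
    (List.foldl_map (f := fun it : List (String × String) => (pvClassify it, it))
      (g := fun (d : PySem.Dict String (List (List (String × String))))
        (p : String × List (String × String)) => PySem.Dict.modify d p.1 [] (· ++ [p.2]))
      (l := data_list) (init := d0)).symm
  have hgetD : ∀ c, dF.getD c [] =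
      d0.getD c [] ++ data_list.filter (fun it => pvClassify it == c) := by
    intro c
    rw [hmap, PySem.Dict.getD_foldl_modify_append]
    congr 1
    rw [List.filter_map, List.map_map]
    simp [Function.comp_def]
  have hnodupK : dF.keys.Nodup :=
    PySem.Dict.nodup_keys_foldl_modify_key data_list pvClassify []
      (fun _ it => (· ++ [it])) d0 (by decide)
  have hkeys : dF.keys = d0.keys := by
    rw [hdF, PySem.Dict.keys_foldl_modify_key, PySem.Set.update_eq_append_filter]
    have h : ((PySem.Set.ofList (data_list.map pvClassify)).filter
        (fun y => !(PySem.Set.contains d0.keys y))) = [] := by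
      rw [List.filter_eq_nil_iff]
      intro y hy
      have hy' : y ∈ data_list.map pvClassify :=
        (PySem.List.mem_dedup (data_list.map pvClassify) y).mp hy
      obtain ⟨it, -, rfl⟩ := List.mem_map.mp hy'
      have hc := classify_mem it
      simp only [List.mem_cons, List.not_mem_nil, or_false] at hc
      rcases hc with h | h | h | h | h <;> rw [h] <;> decide
    rw [h, List.append_nil]
  have hitems : dF.items = d0.keys.map (fun k => (k, dF.getD k [])) := by
    rw [PySem.Dict.items_eq_map_keys dF hnodupK [], hkeys]
  rw [hitems]
  rw [altFold_eq_filter_map]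
  have hnames : pvCategories.map (·.1) ++ ["Other"] =
      ["Location & Navigation", "Environmental", "Motion & Orientation", "System Status", "Other"] := by
    decide
  have hdkeys : d0.keys =
      ["Location & Navigation", "Environmental", "Motion & Orientation", "System Status", "Other"] := by
    rw [hd0]; decide
  rw [hnames, hdkeys, List.nil_append]
  congr 1
  simp only [List.map_cons, List.map_nil]
  rw [hgetD, hgetD, hgetD, hgetD, hgetD, hd0]
  rfl

-- ===== VERDICT (by name: the statement is the Claim_ definition above) =====
theorem organize_sensor_data_py_spec : Claim_equal_organize_sensor_data_py := by
  intro data_list _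
  exact organize_sensor_data_py_spec' data_list
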